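-- pv_equiv track=rewrite | github.com/pjo256/tensorclaw | tensorclaw/tui/widgets/metrics_view.py | _normalize_metric_name
-- ===== SOURCE A (Python) =====
-- def _normalize_metric_name(name: str) -> str:
--     if not name:
--         return ""
--     normalized = name.strip().lower()
--     normalized = normalized.replace("/", "_per_")
--     normalized = normalized.replace("%", "_pct")
--     normalized = normalized.replace("-", "_")
--     normalized = normalized.replace(" ", "_")
--     return "".join(ch for ch in normalized if ch.isalnum() or ch == "_").strip("_")
-- ===== SOURCE B (Python) =====
-- _SPECIALS = {"/": "_per_", "%": "_pct", "-": "_", " ": "_"}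
--
--
-- def _normalize_metric_name(name: str) -> str:
--     if not name:
--         return ""
--     pieces = []
--     for ch in name.strip().lower():
--         if ch in _SPECIALS:
--             pieces.append(_SPECIALS[ch])
--         elif ch.isalnum() or ch == "_":
--             pieces.append(ch)
--     return "".join(pieces).strip("_")
-- ===== Notes on version B (the rewrite author's own statement) =====
-- stated objective: alternative
-- what changed: Replaces A's four sequential whole-string .replace passes plus a filtering comprehension (five passes, each building a new string) with a single table-driven pass that maps each character to its replacement token, keeps alnum/underscore characters and drops the rest.
import Mathlib
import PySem

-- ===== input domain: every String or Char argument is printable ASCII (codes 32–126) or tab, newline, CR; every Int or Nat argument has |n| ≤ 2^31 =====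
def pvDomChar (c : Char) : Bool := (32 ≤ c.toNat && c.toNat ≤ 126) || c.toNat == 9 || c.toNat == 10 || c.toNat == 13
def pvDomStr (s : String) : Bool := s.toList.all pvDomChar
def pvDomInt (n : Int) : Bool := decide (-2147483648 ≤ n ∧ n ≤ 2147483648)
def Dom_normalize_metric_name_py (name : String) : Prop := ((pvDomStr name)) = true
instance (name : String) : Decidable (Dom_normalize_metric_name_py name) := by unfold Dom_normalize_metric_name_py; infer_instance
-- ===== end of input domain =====

-- B replaces A's four sequential whole-string replace passes + filtering comprehension
-- with a single table-driven pass over the characters (alternative decomposition).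


-- ===== PORT A =====
-- literal transliteration of A: strip+lower, then four .replace passes, then the
-- filtering comprehension, then .strip('_')
def normalize_metric_name_py (name : String) : String :=
  if name = "" then ""
  else
    let normalized := PySem.Chars.lower (PySem.Chars.strip name.toList)
    let n1 := PySem.Chars.replace normalized ['/'] ['_', 'p', 'e', 'r', '_']
    let n2 := PySem.Chars.replace n1 ['%'] ['_', 'p', 'c', 't']
    let n3 := PySem.Chars.replace n2 ['-'] ['_']
    let n4 := PySem.Chars.replace n3 [' '] ['_']
    String.ofList (PySem.Chars.stripChars
      (n4.filter (fun ch => PySem.Chars.isalnum ch || ch == '_')) ['_'])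

-- ===== PORT B =====
-- the replacement table _SPECIALS of Source B
def pvSpecials : PySem.Dict Char (List Char) :=
  ((((PySem.Dict.empty.insert '/' ['_', 'p', 'e', 'r', '_']).insert
      '%' ['_', 'p', 'c', 't']).insert
      '-' ['_']).insert
      ' ' ['_'])

def normalize_metric_name_py_alt (name : String) : String :=
  if name = "" then ""
  else
    let s := PySem.Chars.lower (PySem.Chars.strip name.toList)
    let pieces := s.foldl (fun acc ch =>
      if pvSpecials.contains ch then acc ++ pvSpecials.getD ch []
      else if PySem.Chars.isalnum ch || ch == '_' then acc ++ [ch]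
      else acc) []
    String.ofList (PySem.Chars.stripChars pieces ['_'])

-- ===== PRECONDITION & SPEC =====
def Spec_normalize_metric_name_py (name : String) (out : String) : Prop := out = normalize_metric_name_py_alt name
instance (name : String) (out : String) : Decidable (Spec_normalize_metric_name_py name out) := by unfold Spec_normalize_metric_name_py; infer_instance

-- ===== CLAIM (what is proved, stated in full; the proofs are below) =====
def Claim_equal_normalize_metric_name_py : Prop := ∀ (name : String), Dom_normalize_metric_name_py name → Spec_normalize_metric_name_py name (normalize_metric_name_py name)

-- ===== LEMMAS AND PROOFS =====

-- single-character .replace is a per-character flatMap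
lemma replace_go_single (o : Char) (new : List Char) :
    ∀ (s acc : List Char),
      PySem.Chars.replace.go [o] new s.length s acc
        = acc.reverse ++ s.flatMap (fun c => if c = o then new else [c]) := by
  intro s
  induction s with
  | nil => intro acc; simp [PySem.Chars.replace.go]
  | cons c t ih =>
    intro acc
    simp only [List.length_cons, PySem.Chars.replace.go, List.isPrefixOf,
      List.flatMap_cons]
    by_cases h : c = o
    · simp [h, ih, List.append_assoc]
    · have : (o == c) = false := by simp; exact fun e => h e.symm
      simp [this, ih, h]

lemma replace_single (s : List Char) (o : Char) (new : List Char) :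
    PySem.Chars.replace s [o] new
      = s.flatMap (fun c => if c = o then new else [c]) := by
  simp [PySem.Chars.replace, replace_go_single]

-- the per-character action of B's single pass
def pvStep (c : Char) : List Char :=
  if pvSpecials.contains c then pvSpecials.getD c []
  else if PySem.Chars.isalnum c || c == '_' then [c]
  else []

-- A's replace pipeline followed by the filter equals one flatMap of pvStep
lemma pipeline_eq_flatMap (s : List Char) :
    ((((PySem.Chars.replace
        (PySem.Chars.replace
          (PySem.Chars.replace
            (PySem.Chars.replace s ['/'] ['_', 'p', 'e', 'r', '_'])
            ['%'] ['_', 'p', 'c', 't'])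
          ['-'] ['_'])
        [' '] ['_'])).filter (fun ch => PySem.Chars.isalnum ch || ch == '_')))
      = s.flatMap pvStep := by
  induction s with
  | nil => simp [replace_single]
  | cons c t ih =>
    simp only [replace_single, List.flatMap_cons, List.flatMap_append, List.filter_append] at *
    rw [ih]
    congr 1
    by_cases h1 : c = '/'
    · subst h1; decide
    by_cases h2 : c = '%'
    · subst h2; decide
    by_cases h3 : c = '-'
    · subst h3; decide
    by_cases h4 : c = ' '
    · subst h4; decide
    simp only [if_neg h1, if_neg h2, if_neg h3, if_neg h4, List.flatMap_cons,
      List.flatMap_nil, List.append_nil, List.filter]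
    have hc : pvSpecials.contains c = false := by
      simp [pvSpecials, PySem.Dict.contains_insert, PySem.Dict.contains_empty]
      exact ⟨h4, h3, h2, h1⟩
    unfold pvStep
    rw [hc]
    by_cases hp : (PySem.Chars.isalnum c || c == '_') = true
    · simp [hp]
    · simp [hp]

-- B's foldl accumulates exactly the flatMap of pvStep
lemma foldl_eq_flatMap (s : List Char) :
    s.foldl (fun acc ch =>
      if pvSpecials.contains ch then acc ++ pvSpecials.getD ch []
      else if PySem.Chars.isalnum ch || ch == '_' then acc ++ [ch]
      else acc) []
      = s.flatMap pvStep := by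
  have h : (fun (acc : List Char) ch =>
      if pvSpecials.contains ch then acc ++ pvSpecials.getD ch []
      else if PySem.Chars.isalnum ch || ch == '_' then acc ++ [ch]
      else acc) = (fun acc ch => acc ++ pvStep ch) := by
    funext acc ch
    unfold pvStep
    split_ifs <;> simp
  rw [h, PySem.List.foldl_append_eq_flatMap]
  simp

-- ===== VERDICT (by name: the statement is the Claim_ definition above) =====
theorem normalize_metric_name_py_spec : Claim_equal_normalize_metric_name_py := by
  intro name _
  unfold Spec_normalize_metric_name_py normalize_metric_name_py normalize_metric_name_py_alt
  by_cases h : name = ""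
  · simp [h]
  · simp only [if_neg h]
    rw [pipeline_eq_flatMap, foldl_eq_flatMap]
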